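-- pv_equiv track=rewrite | github.com/alhassan069/PythonIITM | week8/grpa.py | linear
-- ===== SOURCE A (Python) =====
-- def linear(P, Q, K):
--     if (len(P) != len(Q)):
--         return False
--     if (P == []):
--         return True
--     if (P[0] != K * Q[0]):
--         return False
--     else:
--         P.remove(P[0])
--         Q.remove(Q[0])
--         return (linear(P, Q, K))
-- ===== SOURCE B (Python) =====
-- # B: single non-mutating zip/all pass instead of A's recursion with list.remove (simpler).
-- # Note: unlike A, B does NOT mutate P and Q; equivalence is about the return value only.
-- def linear(P, Q, K):
--     return len(P) == len(Q) and all(p == K * q for p, q in zip(P, Q))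
-- ===== Notes on version B (the rewrite author's own statement) =====
-- stated objective: simpler
-- what changed: Replaces the recursion that consumes the lists with list.remove by one non-mutating zip/all pass over the two lists; unlike A, B does not mutate P and Q (return value is identical).
import Mathlib
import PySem

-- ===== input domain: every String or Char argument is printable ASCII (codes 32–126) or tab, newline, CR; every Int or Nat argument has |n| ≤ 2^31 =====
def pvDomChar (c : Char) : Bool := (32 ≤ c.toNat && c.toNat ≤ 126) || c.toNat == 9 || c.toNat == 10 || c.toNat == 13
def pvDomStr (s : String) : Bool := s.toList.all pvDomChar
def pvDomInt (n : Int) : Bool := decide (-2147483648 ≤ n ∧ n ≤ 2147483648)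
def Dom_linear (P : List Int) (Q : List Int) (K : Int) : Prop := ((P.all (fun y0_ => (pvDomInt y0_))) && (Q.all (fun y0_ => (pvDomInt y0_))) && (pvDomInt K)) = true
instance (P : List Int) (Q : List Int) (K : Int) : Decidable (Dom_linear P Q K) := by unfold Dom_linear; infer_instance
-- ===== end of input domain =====

-- B replaces A's remove-and-recurse with one non-mutating zip/all pass (simpler);
-- unlike A, B does not mutate P and Q — equivalence is about the RETURN value only.

-- ===== PORT A =====
-- A recurses after removing the first element of each list (P.remove(P[0]) removes index 0).
def linear (P : List Int) (Q : List Int) (K : Int) : Bool :=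
  if P.length ≠ Q.length then false
  else match P, Q with
    | [], _ => true
    | p :: Ps, q :: Qs => if p ≠ K * q then false else linear Ps Qs K
    | _ :: _, [] => false   -- unreachable: lengths are equal here

-- ===== PORT B =====
def linear_alt (P : List Int) (Q : List Int) (K : Int) : Bool :=
  P.length == Q.length && (P.zip Q).all (fun pq => pq.1 == K * pq.2)

-- ===== PRECONDITION & SPEC =====
def Spec_linear (P : List Int) (Q : List Int) (K : Int) (out : Bool) : Prop := out = linear_alt P Q K
instance (P : List Int) (Q : List Int) (K : Int) (out : Bool) : Decidable (Spec_linear P Q K out) := by unfold Spec_linear; infer_instance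

-- ===== CLAIM (what is proved, stated in full; the proofs are below) =====
def Claim_equal_linear : Prop := ∀ (P : List Int) (Q : List Int) (K : Int), Dom_linear P Q K → Spec_linear P Q K (linear P Q K)

-- ===== LEMMAS AND PROOFS =====
theorem linear_eq_alt (P Q : List Int) (K : Int) : linear P Q K = linear_alt P Q K := by
  induction P generalizing Q with
  | nil =>
    cases Q <;> simp [linear, linear_alt]
  | cons p Ps ih =>
    cases Q with
    | nil => simp [linear, linear_alt]
    | cons q Qs =>
      by_cases hlen : Ps.length = Qs.length
      · by_cases h : p = K * q
        · rw [linear]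
          simp only [List.length_cons, hlen, h]
          simp only [ne_eq, not_true_eq_false, if_false]
          rw [ih Qs, linear_alt, linear_alt]
          simp [hlen]
        · simp [linear, linear_alt, h, hlen]
      · simp [linear, linear_alt, hlen]

-- ===== VERDICT (by name: the statement is the Claim_ definition above) =====
theorem linear_spec : Claim_equal_linear := by
  intro P Q K _
  exact linear_eq_alt P Q K
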